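-- pv_equiv track=rewrite | github.com/AdamZhouSE/pythonHomework | Code/CodeRecords/2206/60668/289077.py | linerlist_12_F
-- ===== SOURCE A (Python) =====
-- def f(n):
--     if n==1:
--         return 1
--     else:
--         return f(n-1)+n
--
-- def linerlist_12_F(n):
--     if n==1:
--         return 1
--     else:
--         co = 0
--         re = 1
--         for i in range(1,n):
--             if f(i)<n:
--                 co = i
--         for i in range(f(co)+1,n+1):
--             re *= i
--         return linerlist_12_F(f(co))+re
-- ===== SOURCE B (Python) =====
-- def linerlist_12_F(n):
--     # Iterative: repeatedly strip the last product chunk down to the largest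
--     # triangular number below n, found by binary search (no O(n) recursion).
--     acc = 1
--     while n > 1:
--         lo, hi = 1, n  # invariant: lo*(lo+1)//2 < n <= hi*(hi+1)//2
--         while lo + 1 < hi:
--             mid = (lo + hi) // 2
--             if mid * (mid + 1) // 2 < n:
--                 lo = mid
--             else:
--                 hi = mid
--         t = lo * (lo + 1) // 2
--         p = 1
--         for i in range(t + 1, n + 1):
--             p *= i
--         acc += p
--         n = t
--     return acc
-- ===== Notes on version B (the rewrite author's own statement) =====
-- stated objective: faster
-- what changed: Replaced A's O(n) recursive triangular helper f and its O(n)-call linear scan for co (plus deep Python recursion) by an iterative loop that finds the largest triangular number below n by binary search on k(k+1)//2 and accumulates the product chunks.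
-- outside the precondition, e.g. on linerlist_12_F(0): A raises RecursionError, B returns 1
import Mathlib
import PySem

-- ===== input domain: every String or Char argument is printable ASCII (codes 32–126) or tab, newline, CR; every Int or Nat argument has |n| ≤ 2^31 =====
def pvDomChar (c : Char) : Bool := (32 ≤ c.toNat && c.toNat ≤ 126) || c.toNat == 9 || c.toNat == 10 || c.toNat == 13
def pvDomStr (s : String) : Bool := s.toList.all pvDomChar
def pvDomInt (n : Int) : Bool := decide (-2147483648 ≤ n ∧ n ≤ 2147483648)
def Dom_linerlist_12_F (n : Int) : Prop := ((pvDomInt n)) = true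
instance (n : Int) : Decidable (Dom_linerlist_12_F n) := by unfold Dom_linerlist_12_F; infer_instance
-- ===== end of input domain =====

-- B replaces A's recursive triangular helper f and its linear scan for co by an
-- iterative loop that finds the largest triangular number below n by binary search.

-- ===== PORT A =====
-- helper f of A: f(n) = f(n-1) + n with f(1) = 1.  Python f diverges for n < 1
-- (such calls are excluded by Pre_); ported by structural recursion on the magnitude.
def pvFA : Nat → Int
  | 0 => 1          -- unreachable under Pre_ (Python f never returns for n ≤ 0)
  | 1 => 1
  | (m+2) => pvFA (m+1) + ((m : Int) + 2)

-- f(n) for an Int argument (exact for n ≥ 1, the only calls A makes under Pre_)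
def pvF (n : Int) : Int := pvFA n.toNat

-- body of linerlist_12_F; Python's recursion F(n) → F(f(co)) strictly decreases
-- through positive ints, so fuel n.toNat suffices (fuel 0 unreachable under Pre_)
def pvGoA : Nat → Int → Int
  | 0, _ => 0
  | (fu+1), n =>
    if n = 1 then 1
    else
      let co := (PySem.List.pyRange 1 n 1).foldl (fun co i => if pvF i < n then i else co) 0
      let re := (PySem.List.pyRange (pvF co + 1) (n + 1) 1).foldl (fun re i => re * i) 1
      pvGoA fu (pvF co) + re

def linerlist_12_F (n : Int) : Int := pvGoA n.toNat n

-- ===== PORT B =====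
-- inner binary search of Source B: largest lo with lo*(lo+1)//2 < n;
-- the interval shrinks every step, so fuel (hi-lo).toNat suffices
def pvBS : Nat → Int → Int → Int → Int
  | 0, _, lo, _ => lo
  | (fu+1), n, lo, hi =>
    if lo + 1 < hi then
      let mid := PySem.Int.floordiv (lo + hi) 2
      if PySem.Int.floordiv (mid * (mid + 1)) 2 < n then pvBS fu n mid hi
      else pvBS fu n lo mid
    else lo

-- outer while-loop of Source B; n strictly decreases through positive ints, fuel n.toNat
def pvGoB : Nat → Int → Int → Int
  | 0, _, acc => acc
  | (fu+1), n, acc =>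
    if n > 1 then
      let lo := pvBS (n - 1).toNat n 1 n
      let t := PySem.Int.floordiv (lo * (lo + 1)) 2
      let p := (PySem.List.pyRange (t + 1) (n + 1) 1).foldl (fun p i => p * i) 1
      pvGoB fu t (acc + p)
    else acc

def linerlist_12_F_alt (n : Int) : Int := pvGoB n.toNat n 1

-- ===== PRECONDITION & SPEC =====
-- Python A's helper f recurses as f(n-1) with no floor, so for n ≤ 0 A raises RecursionError
def Pre_linerlist_12_F (n : Int) : Prop := 1 ≤ n
instance (n : Int) : Decidable (Pre_linerlist_12_F n) := by unfold Pre_linerlist_12_F; infer_instance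
def pvWitness_linerlist_12_F : Int := 7

def Spec_linerlist_12_F (n : Int) (out : Int) : Prop := out = linerlist_12_F_alt n
instance (n : Int) (out : Int) : Decidable (Spec_linerlist_12_F n out) := by unfold Spec_linerlist_12_F; infer_instance

-- ===== CLAIM (what is proved, stated in full; the proofs are below) =====
def Claim_equal_linerlist_12_F : Prop := ∀ (n : Int), Dom_linerlist_12_F n → Pre_linerlist_12_F n → Spec_linerlist_12_F n (linerlist_12_F n)

-- ===== LEMMAS AND PROOFS =====

-- the triangular number T(k) = k*(k+1)//2, as both programs compute it
def pvTri (k : Int) : Int := PySem.Int.floordiv (k * (k + 1)) 2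

theorem pvTri_eq (k : Int) : ∀ q : Int, k * (k + 1) = 2 * q → pvTri k = q := by
  intro q hq
  unfold pvTri
  rw [PySem.Int.floordiv_eq_ediv_of_pos (by omega)]
  omega

theorem pvTri_closed (k : Int) : 2 * pvTri k = k * (k + 1) := by
  obtain ⟨q, hq⟩ : ∃ q, k * (k+1) = 2 * q := by
    rcases Int.even_or_odd k with ⟨c,hc⟩|⟨c,hc⟩
    · exact ⟨c*(k+1), by rw [hc]; ring⟩
    · exact ⟨k*(c+1), by rw [hc]; ring⟩
  rw [pvTri_eq k q hq]; omega

theorem pvTri_mono {a b : Int} (ha : 0 ≤ a) (h : a ≤ b) : pvTri a ≤ pvTri b := by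
  have h1 := pvTri_closed a
  have h2 := pvTri_closed b
  nlinarith

theorem pvTri_ge_self {a : Int} (ha : 0 ≤ a) : a ≤ pvTri a := by
  have h1 := pvTri_closed a
  rcases eq_or_lt_of_le ha with h|h
  · subst h; simp at h1; omega
  · nlinarith

-- existence of the pivot C: the largest positive k with T(k) < n
theorem pvC_exists {n : Int} (hn : 2 ≤ n) : ∃ C : Int, 1 ≤ C ∧ pvTri C < n ∧ n ≤ pvTri (C + 1) := by
  obtain ⟨m, rfl⟩ : ∃ m : Nat, (m : Int) = n := ⟨n.toNat, by omega⟩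
  induction m with
  | zero => omega
  | succ k ih =>
    by_cases hk : 2 ≤ (k : Int)
    · obtain ⟨C, h1, h2, h3⟩ := ih hk
      by_cases hlt : (k : Int) + 1 ≤ pvTri (C + 1)
      · exact ⟨C, h1, by push_cast; omega, by push_cast; omega⟩
      · refine ⟨C + 1, by omega, by push_cast; omega, ?_⟩
        have e1 := pvTri_closed (C+1)
        have e2 := pvTri_closed (C+1+1)
        push_cast
        nlinarith
    · have : (k : Int) = 1 := by push_cast at hn ⊢; omega
      refine ⟨1, le_refl _, ?_, ?_⟩ <;> (simp [pvTri, PySem.Int.floordiv]; omega)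

theorem pvC_unique {n C C' : Int} (hC : 1 ≤ C ∧ pvTri C < n ∧ n ≤ pvTri (C + 1))
    (hC' : 1 ≤ C' ∧ pvTri C' < n ∧ n ≤ pvTri (C' + 1)) : C = C' := by
  obtain ⟨h1, h2, h3⟩ := hC
  obtain ⟨h1', h2', h3'⟩ := hC'
  by_contra hne
  rcases lt_or_gt_of_ne hne with h|h
  · have := pvTri_mono (a := C+1) (b := C') (by omega) (by omega); omega
  · have := pvTri_mono (a := C'+1) (b := C) (by omega) (by omega); omega

theorem pvFA_eq : ∀ m : Nat, pvFA (m + 1) = pvTri ((m : Int) + 1) := by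
  intro m
  induction m with
  | zero => simp [pvFA, pvTri, PySem.Int.floordiv]
  | succ k ih =>
    show pvFA (k + 2) = _
    rw [pvFA, ih]
    have h1 := pvTri_closed ((k : Int) + 1)
    have h2 := pvTri_closed ((k : Int) + 1 + 1)
    push_cast
    nlinarith

theorem pvF_eq (i : Int) (h : 1 ≤ i) : pvF i = pvTri i := by
  obtain ⟨m, hm⟩ : ∃ m : Nat, i.toNat = m + 1 := ⟨i.toNat - 1, by omega⟩
  unfold pvF
  rw [hm, pvFA_eq]
  congr 1
  omega

-- A's scan keeps the last index satisfying a downward-closed condition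
theorem pvFold_min (C : Int) (hC : 1 ≤ C) : ∀ m : Nat, 2 ≤ m →
    (PySem.List.pyRange 1 (m : Int) 1).foldl (fun co i => if i ≤ C then i else co) 0
      = min C ((m : Int) - 1) := by
  intro m
  induction m with
  | zero => omega
  | succ k ih =>
    intro hk
    by_cases h2 : 2 ≤ k
    · rw [show ((k+1 : Nat) : Int) = (k : Int) + 1 by push_cast; ring,
          PySem.List.pyRange_one_succ_right (by omega), List.foldl_append, ih h2]
      simp only [List.foldl]
      split_ifs <;> omega
    · have hk1 : k = 1 := by omega
      subst hk1
      rw [show ((2 : Nat) : Int) = (2:Int) by norm_num]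
      rw [show PySem.List.pyRange 1 2 1 = [1] from PySem.List.pyRange_one_singleton 1]
      simp only [List.foldl]
      split_ifs
      all_goals omega

-- A's linear scan computes C
theorem pvFold_eq_C {n C : Int} (hn : 2 ≤ n) (hC : 1 ≤ C ∧ pvTri C < n ∧ n ≤ pvTri (C + 1)) :
    (PySem.List.pyRange 1 n 1).foldl (fun co i => if pvF i < n then i else co) 0 = C := by
  obtain ⟨h1, h2, h3⟩ := hC
  have hcg : (PySem.List.pyRange 1 n 1).foldl (fun co i => if pvF i < n then i else co) 0
      = (PySem.List.pyRange 1 n 1).foldl (fun co i => if i ≤ C then i else co) 0 := by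
    apply PySem.List.foldl_congr_mem
    intro acc x hx
    rw [PySem.List.mem_pyRange_one] at hx
    rw [pvF_eq x hx.1]
    congr 1
    simp only [eq_iff_iff]
    constructor
    · intro h
      by_contra hgt
      have := pvTri_mono (a := C + 1) (b := x) (by omega) (by omega)
      omega
    · intro h
      have := pvTri_mono (a := x) (b := C) (by omega) h
      omega
  obtain ⟨m, hm⟩ : ∃ m : Nat, (m : Int) = n := ⟨n.toNat, by omega⟩
  have hCn : C < n := by have := pvTri_ge_self (a := C) (by omega); omega
  rw [hcg, ← hm, pvFold_min C h1 m (by omega)]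
  omega

-- B's binary search computes the same C
theorem pvBS_eq_C {n C : Int} (hC : 1 ≤ C ∧ pvTri C < n ∧ n ≤ pvTri (C + 1)) :
    ∀ fu : Nat, ∀ lo hi : Int, 1 ≤ lo → lo < hi → pvTri lo < n → n ≤ pvTri hi →
      (hi - lo).toNat ≤ fu + 1 → pvBS fu n lo hi = C := by
  intro fu
  induction fu with
  | zero =>
    intro lo hi h1 h2 h3 h4 h5
    have hhi : hi = lo + 1 := by omega
    subst hhi
    exact pvC_unique ⟨h1, h3, h4⟩ hC
  | succ k ih =>
    intro lo hi h1 h2 h3 h4 h5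
    rw [pvBS]
    by_cases hs : lo + 1 < hi
    · rw [if_pos hs]
      have hmid : PySem.Int.floordiv (lo + hi) 2 = (lo + hi) / 2 :=
        PySem.Int.floordiv_eq_ediv_of_pos (by omega)
      simp only [hmid]
      have hb1 : lo + 1 ≤ (lo + hi) / 2 := by omega
      have hb2 : (lo + hi) / 2 ≤ hi - 1 := by omega
      by_cases ht : PySem.Int.floordiv ((lo + hi) / 2 * ((lo + hi) / 2 + 1)) 2 < n
      · rw [if_pos ht]
        exact ih _ _ (by omega) (by omega) ht h4 (by omega)
      · rw [if_neg ht]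
        have ht2 : n ≤ pvTri ((lo + hi) / 2) := not_lt.mp ht
        exact ih _ _ (by omega) (by omega) h3 ht2 (by omega)
    · rw [if_neg hs]
      have hhi : hi = lo + 1 := by omega
      subst hhi
      exact pvC_unique ⟨h1, h3, h4⟩ hC

-- main correspondence: B's accumulator loop equals A's recursion, shifted by acc - 1
theorem pvGo_eq : ∀ m : Nat, ∀ n : Int, 1 ≤ n → n.toNat ≤ m →
    ∀ fuA fuB : Nat, n.toNat ≤ fuA → n.toNat ≤ fuB →
    ∀ acc : Int, pvGoB fuB n acc = acc - 1 + pvGoA fuA n := by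
  intro m
  induction m using Nat.strong_induction_on with
  | _ m ih =>
    intro n hn hm fuA fuB hfA hfB acc
    obtain ⟨a, rfl⟩ : ∃ a, fuA = a + 1 := ⟨fuA - 1, by omega⟩
    obtain ⟨b, rfl⟩ : ∃ b, fuB = b + 1 := ⟨fuB - 1, by omega⟩
    by_cases h1 : n = 1
    · subst h1
      simp [pvGoA, pvGoB]
    · have hn2 : 2 ≤ n := by omega
      obtain ⟨C, hC1, hC2, hC3⟩ := pvC_exists hn2
      have htpos : 1 ≤ pvTri C := le_trans hC1 (pvTri_ge_self (by omega))
      have hgt : n > 1 := by omega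
      simp only [pvGoA, pvGoB, if_neg h1, if_pos hgt]
      rw [pvFold_eq_C hn2 ⟨hC1, hC2, hC3⟩,
          pvBS_eq_C ⟨hC1, hC2, hC3⟩ (n - 1).toNat 1 n (by omega) (by omega)
            (by have : pvTri 1 = 1 := by decide
                omega)
            (pvTri_ge_self (a := n) (by omega)) (by omega),
          pvF_eq C hC1,
          show PySem.Int.floordiv (C * (C + 1)) 2 = pvTri C from rfl,
          ih (pvTri C).toNat (by omega) (pvTri C) htpos le_rfl a b (by omega) (by omega)]
      ring

-- ===== VERDICT (by name: the statement is the Claim_ definition above) =====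
theorem linerlist_12_F_spec : Claim_equal_linerlist_12_F := by
  intro n _ hn
  unfold Spec_linerlist_12_F linerlist_12_F linerlist_12_F_alt
  have := pvGo_eq n.toNat n hn le_rfl n.toNat n.toNat le_rfl le_rfl 1
  omega
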